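-- pv_equiv track=rewrite | github.com/qiqi-xingyi/QDockBank_2 | build_qdockbank2_set.py | residues_to_fragments
-- ===== SOURCE A (Python) =====
-- AA3_TO_AA1 = {
--     "ALA": "A", "ARG": "R", "ASN": "N", "ASP": "D",
--     "CYS": "C", "GLN": "Q", "GLU": "E", "GLY": "G",
--     "HIS": "H", "ILE": "I", "LEU": "L", "LYS": "K",
--     "MET": "M", "PHE": "F", "PRO": "P", "SER": "S",
--     "THR": "T", "TRP": "W", "TYR": "Y", "VAL": "V",
-- }
--
-- def residues_to_fragments(chain_residues, pdb_id, chain_id):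
--     """
--     Given dict resSeq->resName3, generate contiguous runs as list of
--     (start_resSeq, end_resSeq, [aa1, aa1, ...]).
--     """
--     if not chain_residues:
--         return []
--
--     resnums = sorted(chain_residues.keys())
--     runs = []
--     run = [resnums[0]]
--
--     for r in resnums[1:]:
--         if r == run[-1] + 1:
--             run.append(r)
--         else:
--             runs.append(run)
--             run = [r]
--     runs.append(run)
--
--     contiguous_fragments = []
--     for run_resnums in runs:
--         aa1_list = []
--         valid = True
--         for r in run_resnums:
--             res3 = chain_residues[r]
--             if res3 not in AA3_TO_AA1:
--                 valid = False
--                 break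
--             aa1_list.append(AA3_TO_AA1[res3])
--         if not valid:
--             continue
--         contiguous_fragments.append(
--             (run_resnums[0], run_resnums[-1], aa1_list)
--         )
--
--     return contiguous_fragments
-- ===== SOURCE B (Python) =====
-- AA3_TO_AA1 = {
--     "ALA": "A", "ARG": "R", "ASN": "N", "ASP": "D",
--     "CYS": "C", "GLN": "Q", "GLU": "E", "GLY": "G",
--     "HIS": "H", "ILE": "I", "LEU": "L", "LYS": "K",
--     "MET": "M", "PHE": "F", "PRO": "P", "SER": "S",
--     "THR": "T", "TRP": "W", "TYR": "Y", "VAL": "V",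
-- }
--
-- def residues_to_fragments(chain_residues, pdb_id, chain_id):
--     """Single pass over the sorted residue numbers: carry the current run's
--     (start, prev, aa1-or-None) and emit a fragment at each numbering break;
--     aa1 becomes None as soon as an unknown residue name is seen, which drops
--     the whole run at emission time."""
--     frags = []
--     start = prev = aa1 = None
--     for r in sorted(chain_residues):
--         if start is not None and r == prev + 1:
--             if aa1 is not None:
--                 a = AA3_TO_AA1.get(chain_residues[r])
--                 aa1 = None if a is None else aa1 + [a]
--         else:
--             if start is not None and aa1 is not None:
--                 frags.append((start, prev, aa1))
--             start = r
--             a = AA3_TO_AA1.get(chain_residues[r])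
--             aa1 = None if a is None else [a]
--         prev = r
--     if start is not None and aa1 is not None:
--         frags.append((start, prev, aa1))
--     return frags
-- ===== Notes on version B (the rewrite author's own statement) =====
-- stated objective: simpler
-- what changed: A builds the full list of contiguous runs first and then validates/translates each run in a second pass with an inner loop; B makes a single pass over the sorted residue numbers carrying (start, prev, aa1-or-None), invalidating the current run in-flight on an unknown residue name and emitting a fragment at each numbering break.
import Mathlib
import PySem

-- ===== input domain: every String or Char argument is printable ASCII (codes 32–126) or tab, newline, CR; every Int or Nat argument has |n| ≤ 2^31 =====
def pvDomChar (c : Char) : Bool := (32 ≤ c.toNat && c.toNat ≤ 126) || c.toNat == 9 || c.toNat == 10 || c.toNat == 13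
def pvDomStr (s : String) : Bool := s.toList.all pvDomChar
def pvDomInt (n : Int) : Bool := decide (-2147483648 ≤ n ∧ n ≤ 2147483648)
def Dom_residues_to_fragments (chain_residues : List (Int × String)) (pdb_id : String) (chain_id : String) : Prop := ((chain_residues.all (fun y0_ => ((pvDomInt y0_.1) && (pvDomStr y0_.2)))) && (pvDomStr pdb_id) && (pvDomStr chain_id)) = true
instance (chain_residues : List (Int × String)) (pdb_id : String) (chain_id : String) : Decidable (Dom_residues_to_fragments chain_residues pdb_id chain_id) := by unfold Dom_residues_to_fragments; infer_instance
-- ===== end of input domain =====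

-- B replaces A's two-phase algorithm (build all runs, then validate/translate each run)
-- by a single pass over the sorted keys that carries (start, prev, aa1-or-none) and emits
-- at each numbering break; objective: simpler (one pass, no intermediate list of runs).

-- the module constant AA3_TO_AA1 (shared context of both programs)
def pvAA3 : PySem.Dict String String := PySem.Dict.ofList
  [("ALA","A"), ("ARG","R"), ("ASN","N"), ("ASP","D"),
   ("CYS","C"), ("GLN","Q"), ("GLU","E"), ("GLY","G"),
   ("HIS","H"), ("ILE","I"), ("LEU","L"), ("LYS","K"),
   ("MET","M"), ("PHE","F"), ("PRO","P"), ("SER","S"),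
   ("THR","T"), ("TRP","W"), ("TYR","Y"), ("VAL","V")]

-- ===== PORT A =====

-- A's run-building loop body: `if r == run[-1] + 1: run.append(r) else: runs.append(run); run = [r]`
def pvAStep (st : List (List Int) × List Int) (r : Int) : List (List Int) × List Int :=
  if r = (PySem.List.pyGet? st.2 (-1)).getD 0 + 1 then (st.1, st.2 ++ [r])
  else (st.1 ++ [st.2], [r])

-- A's inner validation loop with its `break`: walks the run, appending aa1 letters,
-- stopping with valid=false at the first name absent from AA3_TO_AA1
def pvCheckA (d : PySem.Dict Int String) : List Int → List String → Bool × List String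
  | [], acc => (true, acc)
  | r :: rs, acc =>
    let res3 := (PySem.Dict.get? d r).getD ""   -- chain_residues[r]; r is always a key of d
    match PySem.Dict.get? pvAA3 res3 with
    | none => (false, acc)
    | some a => pvCheckA d rs (acc ++ [a])

-- A's second loop body: keep the run iff valid, with (run[0], run[-1], aa1_list)
def pvEmitStep (d : PySem.Dict Int String) (acc : List (Int × Int × List String))
    (run : List Int) : List (Int × Int × List String) :=
  let (valid, aa1) := pvCheckA d run []
  if valid then
    acc ++ [((PySem.List.pyGet? run 0).getD 0, (PySem.List.pyGet? run (-1)).getD 0, aa1)]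
  else acc

def residues_to_fragments (chain_residues : List (Int × String)) (pdb_id : String) (chain_id : String) : List (Int × Int × List String) :=
  let d := PySem.Dict.ofList chain_residues
  match PySem.List.sorted (PySem.Dict.keys d) (fun x => x) false with
  | [] => []                                    -- `if not chain_residues: return []`
  | r0 :: rest =>                               -- resnums[0] / resnums[1:]
    let st := rest.foldl pvAStep ([], [r0])
    let runs := st.1 ++ [st.2]
    runs.foldl (pvEmitStep d) []

-- ===== PORT B =====

-- B's aa1 update: `a = AA3_TO_AA1.get(chain_residues[r]); aa1 = None if a is None else aa1 + [a]`,
-- where a None aa1 stays None (the Python guard `if aa1 is not None`)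
def pvChkStep (d : PySem.Dict Int String) (o : Option (List String)) (r : Int) : Option (List String) :=
  match o with
  | none => none
  | some l =>
    match PySem.Dict.get? pvAA3 ((PySem.Dict.get? d r).getD "") with
    | none => none
    | some a => some (l ++ [a])

-- B's loop body over state (frags, start, prev, aa1)
def pvBStep (d : PySem.Dict Int String)
    (st : List (Int × Int × List String) × Option Int × Option Int × Option (List String))
    (r : Int) : List (Int × Int × List String) × Option Int × Option Int × Option (List String) :=
  let (frags, start, prev, aa1) := st
  if start.isSome ∧ r = prev.getD 0 + 1 then
    (frags, start, some r, pvChkStep d aa1 r)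
  else
    ((match start, aa1 with
      | some s, some l => frags ++ [(s, prev.getD 0, l)]
      | _, _ => frags),
     some r, some r, pvChkStep d (some []) r)   -- fresh run: aa1 = None if a is None else [a]

def residues_to_fragments_alt (chain_residues : List (Int × String)) (pdb_id : String) (chain_id : String) : List (Int × Int × List String) :=
  let d := PySem.Dict.ofList chain_residues
  let st := (PySem.List.sorted (PySem.Dict.keys d) (fun x => x) false).foldl
    (pvBStep d) ([], none, none, none)
  match st.2.1, st.2.2.2 with                  -- `if start is not None and aa1 is not None`
  | some s, some l => st.1 ++ [(s, st.2.2.1.getD 0, l)]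
  | _, _ => st.1

-- ===== PRECONDITION & SPEC =====
def Spec_residues_to_fragments (chain_residues : List (Int × String)) (pdb_id : String) (chain_id : String) (out : List (Int × Int × List String)) : Prop := out = residues_to_fragments_alt chain_residues pdb_id chain_id
instance (chain_residues : List (Int × String)) (pdb_id : String) (chain_id : String) (out : List (Int × Int × List String)) : Decidable (Spec_residues_to_fragments chain_residues pdb_id chain_id out) := by unfold Spec_residues_to_fragments; infer_instance

-- ===== CLAIM (what is proved, stated in full; the proofs are below) =====
def Claim_equal_residues_to_fragments : Prop := ∀ (chain_residues : List (Int × String)) (pdb_id : String) (chain_id : String), Dom_residues_to_fragments chain_residues pdb_id chain_id → Spec_residues_to_fragments chain_residues pdb_id chain_id (residues_to_fragments chain_residues pdb_id chain_id)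

-- ===== LEMMAS AND PROOFS =====

-- B's aa1 view of a whole run, and A's fragment list over a list of runs
def pvChk (d : PySem.Dict Int String) (run : List Int) : Option (List String) :=
  run.foldl (pvChkStep d) (some [])

def pvEmitAll (d : PySem.Dict Int String) (runs : List (List Int)) : List (Int × Int × List String) :=
  runs.foldl (pvEmitStep d) []

theorem pvChk_none (d : PySem.Dict Int String) (run : List Int) :
    run.foldl (pvChkStep d) none = none := by
  induction run with
  | nil => rfl
  | cons r rs ih => simpa [pvChkStep] using ih

theorem pvChk_eq_checkA (d : PySem.Dict Int String) :
    ∀ (run : List Int) (acc : List String),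
      run.foldl (pvChkStep d) (some acc)
        = (if (pvCheckA d run acc).1 then some (pvCheckA d run acc).2 else none) := by
  intro run
  induction run with
  | nil => intro acc; rfl
  | cons r rs ih =>
    intro acc
    simp only [List.foldl_cons, pvChkStep, pvCheckA]
    cases h : PySem.Dict.get? pvAA3 ((PySem.Dict.get? d r).getD "") with
    | none => simp [pvChk_none]
    | some a => simpa using ih (acc ++ [a])

theorem pvEmitStep_eq (d : PySem.Dict Int String) (acc : List (Int × Int × List String))
    (run : List Int) :
    pvEmitStep d acc run
      = match pvChk d run with
        | some l => acc ++ [(run.headI, run.getLast?.getD 0, l)]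
        | none => acc := by
  unfold pvEmitStep pvChk
  rw [pvChk_eq_checkA d run []]
  have h0 : (PySem.List.pyGet? run 0).getD 0 = run.headI := by
    cases run with
    | nil => rfl
    | cons a l => simp
  have h1 : (PySem.List.pyGet? run (-1)).getD 0 = run.getLast?.getD 0 := by
    rw [PySem.List.pyGet?_neg_one]
  rcases hc : pvCheckA d run [] with ⟨v, out⟩
  cases v <;> simp [h0, h1]

theorem pvEmitAll_append (d : PySem.Dict Int String) (runs : List (List Int)) (run : List Int) :
    pvEmitAll d (runs ++ [run]) = pvEmitStep d (pvEmitAll d runs) run := by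
  simp [pvEmitAll, List.foldl_append]

theorem pvMainInv (d : PySem.Dict Int String) :
    ∀ (rest : List Int) (runs : List (List Int)) (run : List Int), run ≠ [] →
      rest.foldl (pvBStep d)
          (pvEmitAll d runs, some run.headI, some (run.getLast?.getD 0), pvChk d run)
        = (pvEmitAll d (rest.foldl pvAStep (runs, run)).1,
           some (rest.foldl pvAStep (runs, run)).2.headI,
           some ((rest.foldl pvAStep (runs, run)).2.getLast?.getD 0),
           pvChk d (rest.foldl pvAStep (runs, run)).2) := by
  intro rest
  induction rest with
  | nil => intro runs run _; rfl
  | cons r rs ih =>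
    intro runs run hne
    have hcond : (PySem.List.pyGet? run (-1)).getD 0 = run.getLast?.getD 0 := by
      rw [PySem.List.pyGet?_neg_one]
    by_cases h : r = run.getLast?.getD 0 + 1
    · have hA : pvAStep (runs, run) r = (runs, run ++ [r]) := by
        simp [pvAStep, hcond, h]
      have hB : pvBStep d (pvEmitAll d runs, some run.headI, some (run.getLast?.getD 0), pvChk d run) r
          = (pvEmitAll d runs, some (run ++ [r]).headI, some ((run ++ [r]).getLast?.getD 0),
             pvChk d (run ++ [r])) := by
        have hh : (run ++ [r]).headI = run.headI := by
          cases run with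
          | nil => exact absurd rfl hne
          | cons a l => rfl
        simp only [pvBStep, Option.isSome_some, Option.getD_some, true_and, if_pos h]
        rw [hh, List.getLast?_concat]
        simp [pvChk, List.foldl_append, h]
      rw [List.foldl_cons, hB, List.foldl_cons, hA]
      exact ih runs (run ++ [r]) (by simp)
    · have hA : pvAStep (runs, run) r = (runs ++ [run], [r]) := by
        simp [pvAStep, hcond, h]
      have hB : pvBStep d (pvEmitAll d runs, some run.headI, some (run.getLast?.getD 0), pvChk d run) r
          = (pvEmitAll d (runs ++ [run]), some r, some r, pvChk d [r]) := by
        simp only [pvBStep, Option.isSome_some, Option.getD_some, true_and, if_neg h]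
        rw [pvEmitAll_append, pvEmitStep_eq]
        cases pvChk d run <;> simp [pvChk]
      rw [List.foldl_cons, hB, List.foldl_cons, hA]
      exact ih (runs ++ [run]) [r] (by simp)

-- ===== VERDICT (by name: the statement is the Claim_ definition above) =====
theorem residues_to_fragments_spec : Claim_equal_residues_to_fragments := by
  intro chain_residues pdb_id chain_id _
  unfold Spec_residues_to_fragments residues_to_fragments residues_to_fragments_alt
  cases hs : PySem.List.sorted (PySem.Dict.keys (PySem.Dict.ofList chain_residues)) (fun x => x) false with
  | nil => simp only [hs]; rfl
  | cons r0 rest =>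
    set d := PySem.Dict.ofList chain_residues with hd
    simp only [hs]
    -- first B step, from the all-None initial state
    have hfirst : pvBStep d ([], none, none, none) r0
        = (pvEmitAll d [], some ([r0] : List Int).headI, some (([r0] : List Int).getLast?.getD 0),
           pvChk d [r0]) := by
      simp [pvBStep, pvEmitAll, pvChk]
    rw [List.foldl_cons, hfirst, pvMainInv d rest [] [r0] (by simp)]
    rcases hst : rest.foldl pvAStep ([], [r0]) with ⟨runs', run'⟩
    simp only
    have he : List.foldl (pvEmitStep d) [] (runs' ++ [run'])
        = pvEmitStep d (pvEmitAll d runs') run' := pvEmitAll_append d runs' run'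
    rw [he, pvEmitStep_eq]
    simp only [Option.getD_some]
    cases pvChk d run' with
    | none => rfl
    | some l => rfl
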